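-- pv_equiv track=rewrite | github.com/adsabs/arxiv-reference-extractor | ads_ref_extract/tex.py | _split_on_delimited_prefix
-- ===== SOURCE A (Python) =====
-- from typing import Generator, List, Optional, Tuple, Union
--
-- def _split_on_delimited_prefix(text: str, open: str, close: str) -> Tuple[str, str]:
--     """
--     `open` and `close` are paired delimiters such as "{" and "}"
--
--     `text` may start with whitespace and then the opening delimiter. If so, we
--     trace through until we find the balanced closing delimiter, and split the
--     text at that point. If we encounter a non-space, non-opener before finding
--     either of those, the "left" split text is empty.
--     """
--
--     depth = 0
--
--     for (idx, cur_char) in enumerate(text):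
--         if depth:
--             if cur_char == open:
--                 depth += 1
--             elif cur_char == close:
--                 depth -= 1
--
--             if not depth:
--                 return text[: idx + 1], text[idx + 1 :]
--             continue
--
--         if cur_char.isspace():
--             pass
--         elif cur_char == open:
--             depth += 1
--         else:
--             return ("", text)
-- ===== SOURCE B (Python) =====
-- def _split_on_delimited_prefix(text, open_, close):
--     # Jump-scan: instead of a char-by-char depth automaton, hop between
--     # occurrences of `close` with str.find and count `open`s in each gap
--     # with str.count, keeping a running balance.
--     stripped = text.lstrip()
--     if not stripped:
--         return None  # empty / all-whitespace: fall through like A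
--     if stripped[0] != open_:
--         return ("", text)
--     if len(close) != 1 or close == open_:
--         return None  # depth can never return to zero
--     pos = len(text) - len(stripped)
--     balance = 0
--     while True:
--         k = text[pos:].find(close)
--         if k == -1:
--             return None  # unbalanced
--         j = pos + k
--         balance += text[pos:j].count(open_) - 1
--         if balance == 0:
--             return text[: j + 1], text[j + 1 :]
--         pos = j + 1
-- ===== Notes on version B (the rewrite author's own statement) =====
-- stated objective: alternative
-- what changed: A's char-by-char depth automaton is replaced by a jump scan: after lstrip decides the early exits, B hops between occurrences of `close` with str.find and totals the `open`s in each gap with str.count, checking a running balance only at close positions (degenerate delimiters — multi-char or close==open — are rejected up front since the depth can then never return to zero).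
import Mathlib
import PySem

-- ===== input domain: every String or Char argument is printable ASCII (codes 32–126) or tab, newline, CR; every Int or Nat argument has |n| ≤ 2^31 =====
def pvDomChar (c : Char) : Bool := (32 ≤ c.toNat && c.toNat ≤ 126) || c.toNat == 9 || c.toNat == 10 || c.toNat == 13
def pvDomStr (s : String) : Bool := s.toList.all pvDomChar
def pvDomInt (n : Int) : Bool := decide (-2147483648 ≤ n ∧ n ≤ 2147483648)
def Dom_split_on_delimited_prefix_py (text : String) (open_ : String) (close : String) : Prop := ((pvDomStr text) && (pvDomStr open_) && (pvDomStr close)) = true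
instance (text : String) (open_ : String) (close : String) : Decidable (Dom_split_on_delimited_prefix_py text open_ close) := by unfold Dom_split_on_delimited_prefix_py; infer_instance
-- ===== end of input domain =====

-- B replaces A's char-by-char depth automaton by a jump scan: str.find hops between
-- occurrences of `close` and str.count totals the `open`s in each gap, keeping a running
-- balance that is checked only at close positions; same O(n) cost, no speed claim.
-- A's implicit `return None` (empty / all-whitespace / unbalanced input) is Option.none.

-- ===== PORT A =====
-- A's one fused loop: `idx` is the enumerate index over the suffix `rest` of text.toList,
-- `depth` the balance counter; slices text[:idx+1] / text[idx+1:] are take/drop on the full list.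
def pvALoop (text : String) (open_ : String) (close : String)
    (idx : Nat) (rest : List Char) (depth : Nat) : Option (String × String) :=
  match rest with
  | [] => none
  | c :: rs =>
    if depth ≠ 0 then
      let depth' : Nat :=
        if String.ofList [c] = open_ then depth + 1
        else if String.ofList [c] = close then depth - 1
        else depth
      if depth' = 0 then
        some (String.ofList (text.toList.take (idx + 1)), String.ofList (text.toList.drop (idx + 1)))
      else pvALoop text open_ close (idx + 1) rs depth'
    else
      if PySem.Chars.isspace c then pvALoop text open_ close (idx + 1) rs depth
      else if String.ofList [c] = open_ then pvALoop text open_ close (idx + 1) rs (depth + 1)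
      else some ("", text)

def split_on_delimited_prefix_py (text : String) (open_ : String) (close : String) : Option (String × String) :=
  pvALoop text open_ close 0 text.toList 0

-- ===== PORT B =====
-- Source B's `while True` jump loop: `k = text[pos:].find(close)`, `balance += text[pos:j].count(open) - 1`.
-- The while-loop is made total with a fuel argument (len(text)+1 iterations always suffice:
-- `pos` strictly increases); the fuel guard only totalises, it changes no reachable result.
def pvBLoop (text : String) (open_ : String) (close : String) :
    Nat → Nat → Int → Option (String × String)
  | 0, _, _ => none
  | fuel + 1, pos, bal =>
    let k := PySem.Chars.find (text.toList.drop pos) close.toList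
    if k = -1 then none
    else
      let j := pos + k.toNat
      let bal' := bal + (PySem.Chars.count ((text.toList.drop pos).take k.toNat) open_.toList : Int) - 1
      if bal' = 0 then
        some (String.ofList (text.toList.take (j + 1)), String.ofList (text.toList.drop (j + 1)))
      else pvBLoop text open_ close fuel (j + 1) bal'

-- Source B line by line: stripped = text.lstrip(); the three early returns; then the jump loop
-- from pos = len(text) - len(stripped) with balance = 0.
def split_on_delimited_prefix_py_alt (text : String) (open_ : String) (close : String) : Option (String × String) :=
  match PySem.Chars.lstrip text.toList with
  | [] => none
  | c :: _ =>
    if String.ofList [c] ≠ open_ then some ("", text)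
    else if PySem.Str.len close ≠ 1 ∨ close = open_ then none
    else pvBLoop text open_ close (text.toList.length + 1)
           (text.toList.length - (PySem.Chars.lstrip text.toList).length) 0

-- ===== PRECONDITION & SPEC =====
def Spec_split_on_delimited_prefix_py (text : String) (open_ : String) (close : String) (out : Option (String × String)) : Prop := out = split_on_delimited_prefix_py_alt text open_ close
instance (text : String) (open_ : String) (close : String) (out : Option (String × String)) : Decidable (Spec_split_on_delimited_prefix_py text open_ close out) := by unfold Spec_split_on_delimited_prefix_py; infer_instance

-- ===== CLAIM (what is proved, stated in full; the proofs are below) =====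
def Claim_equal_split_on_delimited_prefix_py : Prop := ∀ (text : String) (open_ : String) (close : String), Dom_split_on_delimited_prefix_py text open_ close → Spec_split_on_delimited_prefix_py text open_ close (split_on_delimited_prefix_py text open_ close)

-- ===== LEMMAS AND PROOFS =====

-- single-character strings are equal iff the characters are
theorem pvOfList_eq_iff (l : List Char) (s : String) : String.ofList l = s ↔ l = s.toList := by
  constructor
  · intro h; rw [← h]; simp
  · intro h; rw [h]; simp

-- str.find of a single-character needle is the first index of that character
theorem pvFind_single (cc : Char) (l : List Char) :
    PySem.Chars.find l [cc] = match List.idxOf? cc l with | none => -1 | some i => (i : Int) := by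
  have go : ∀ (l : List Char) (k : Nat),
      PySem.Chars.find.go [cc] l k =
        match List.idxOf? cc l with | none => -1 | some i => ((k + i : Nat) : Int) := by
    intro l
    induction l with
    | nil => intro k; simp [PySem.Chars.find.go]
    | cons h t ih =>
      intro k
      by_cases hh : h = cc
      · subst hh; simp [PySem.Chars.find.go, List.isPrefixOf, List.idxOf?_cons]
      · simp only [PySem.Chars.find.go, List.isPrefixOf, List.idxOf?_cons]
        simp only [beq_iff_eq, hh, if_false, Bool.and_eq_true]
        rw [ih]
        cases hidx : List.idxOf? cc t with
        | none => simp [Ne.symm hh]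
        | some i =>
          simp only [Option.map_some, Ne.symm hh, false_and, if_false]
          push_cast
          ring
  simp [PySem.Chars.find, go]

-- str.count of a single-character needle is the character count
theorem pvCount_single (oc : Char) (l : List Char) :
    PySem.Chars.count l [oc] = l.count oc := by
  have go : ∀ (fuel : Nat) (l : List Char) (acc : Nat),
      PySem.Chars.count.go [oc] fuel l acc = acc + (l.take fuel).count oc := by
    intro fuel
    induction fuel with
    | zero => intro l acc; cases l <;> simp [PySem.Chars.count.go]
    | succ f ih =>
      intro l acc
      cases l with
      | nil => simp [PySem.Chars.count.go]
      | cons h t =>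
        by_cases hh : oc = h
        · subst hh
          simp [PySem.Chars.count.go, List.isPrefixOf, ih]
          omega
        · simp [PySem.Chars.count.go, List.isPrefixOf, hh, ih, Ne.symm hh]
  simp [PySem.Chars.count, go]

-- pos = len(text) - len(stripped) points exactly at the stripped suffix
theorem pvDrop_lstrip (p : Char → Bool) (l : List Char) :
    l.drop (l.length - (l.dropWhile p).length) = l.dropWhile p := by
  induction l with
  | nil => simp
  | cons h t ih =>
    by_cases hp : p h
    · simpa [hp, Nat.succ_sub (List.Sublist.length_le (List.dropWhile_sublist _))] using ih
    · simp [List.dropWhile_cons, hp]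

-- A in the depth-0 regime: skip whitespace, then decide on the first real character
theorem pvASkip (text open_ close : String) :
    ∀ (rest : List Char) (idx : Nat),
      pvALoop text open_ close idx rest 0 =
        match List.dropWhile PySem.Chars.isspace rest with
        | [] => none
        | ch :: rs =>
          if String.ofList [ch] ≠ open_ then some ("", text)
          else pvALoop text open_ close
                 (idx + (rest.length - (List.dropWhile PySem.Chars.isspace rest).length) + 1) rs 1 := by
  intro rest
  induction rest with
  | nil => intro idx; rfl
  | cons ch rs ih =>
    intro idx
    by_cases hsp : PySem.Chars.isspace ch = true
    · have hd : (ch :: rs).dropWhile PySem.Chars.isspace = rs.dropWhile PySem.Chars.isspace := by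
        simp [List.dropWhile_cons, hsp]
      have hlen : (rs.dropWhile PySem.Chars.isspace).length ≤ rs.length :=
        List.Sublist.length_le (List.dropWhile_sublist _)
      simp only [pvALoop, hsp, if_true, ne_eq, decide_not, ite_not, if_neg (by decide : ¬ (0 : Nat) ≠ 0)]
      rw [ih (idx + 1), hd]
      cases hdw : rs.dropWhile PySem.Chars.isspace with
      | nil => rfl
      | cons ch' rs' =>
        have : idx + 1 + (rs.length - (rs.dropWhile PySem.Chars.isspace).length) + 1
             = idx + ((ch :: rs).length - (rs.dropWhile PySem.Chars.isspace).length) + 1 := by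
          simp only [List.length_cons]; omega
      
        simp only [hdw] at this ⊢
        rw [this]
        by_cases hop : String.ofList [ch'] = open_ <;> simp [hop]
    · have hd : (ch :: rs).dropWhile PySem.Chars.isspace = ch :: rs := by
        simp [List.dropWhile_cons, hsp]
      simp only [pvALoop, hsp, hd, if_neg (by decide : ¬ (0 : Nat) ≠ 0), if_false]
      by_cases hop : String.ofList [ch] = open_
      · simp [hop]
      · simp [hop]

-- if no single character ever closes (close not one character, or close = open), A never balances
theorem pvANeverCloses (text open_ close : String)
    (h : ∀ ch : Char, String.ofList [ch] = close → String.ofList [ch] = open_) :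
    ∀ (rest : List Char) (idx depth : Nat), depth ≠ 0 →
      pvALoop text open_ close idx rest depth = none := by
  intro rest
  induction rest with
  | nil => intro idx depth _; rfl
  | cons ch rs ih =>
    intro idx depth hd
    by_cases hop : String.ofList [ch] = open_
    · simp only [pvALoop, if_pos hd, if_pos hop, if_neg (by omega : ¬ depth + 1 = 0)]
      exact ih (idx + 1) (depth + 1) (by omega)
    · have hcl : ¬ String.ofList [ch] = close := fun hc => hop (h ch hc)
      simp only [pvALoop, if_pos hd, if_neg hop, if_neg hcl, if_neg hd]
      exact ih (idx + 1) depth hd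

-- A in the depth>0 regime, reorganised as a jump between successive close characters:
-- the next event is the first `cc`; the depth moves by (#oc in the gap) - 1 there.
theorem pvAJump (text open_ close : String) (oc cc : Char)
    (ho : open_ = String.ofList [oc]) (hc : close = String.ofList [cc]) (hne : oc ≠ cc) :
    ∀ (rest : List Char) (idx depth : Nat), depth ≠ 0 →
      pvALoop text open_ close idx rest depth =
        match List.idxOf? cc rest with
        | none => none
        | some i =>
          if depth + (rest.take i).count oc - 1 = 0 then
            some (String.ofList (text.toList.take (idx + i + 1)),
                  String.ofList (text.toList.drop (idx + i + 1)))
          else pvALoop text open_ close (idx + i + 1) (rest.drop (i + 1))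
                 (depth + (rest.take i).count oc - 1) := by
  intro rest
  induction rest with
  | nil => intro idx depth _; rfl
  | cons ch rs ih =>
    intro idx depth hd
    have hone : ∀ a b : Char, (String.ofList [a] = String.ofList [b]) ↔ a = b := by
      intro a b; rw [pvOfList_eq_iff]; simp
    by_cases hcc : ch = cc
    · have hop : ¬ String.ofList [ch] = open_ := by
        rw [ho, hone]; exact fun h => hne (h.symm.trans hcc)
      have hclose : String.ofList [ch] = close := by rw [hc, hone]; exact hcc
      have hbeq : (ch == cc) = true := by simp [hcc]
      simp only [pvALoop, if_pos hd, if_neg hop, if_pos hclose, List.idxOf?_cons, hbeq, if_pos]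
      simp only [List.take_zero, List.count_nil, Nat.add_zero]
      simp [List.drop_succ_cons]
    · have hclose : ¬ String.ofList [ch] = close := by rw [hc, hone]; exact hcc
      have hbeq : (ch == cc) = false := by simp [hcc]
      by_cases hop : String.ofList [ch] = open_
      · have hchoc : ch = oc := by rw [ho, hone] at hop; exact hop
        simp only [pvALoop, if_pos hd, if_pos hop, if_neg hclose,
          if_neg (by omega : ¬ depth + 1 = 0)]
        rw [ih (idx + 1) (depth + 1) (by omega)]
        simp only [List.idxOf?_cons, hbeq, Bool.false_eq_true, if_false]
        cases hidx : List.idxOf? cc rs with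
        | none => simp
        | some i =>
          simp only [Option.map_some]
          have htake : ((ch :: rs).take (i + 1)).count oc = (rs.take i).count oc + 1 := by
            simp [List.take_succ_cons, List.count_cons, hchoc]
          have harith : depth + 1 + (rs.take i).count oc - 1
              = depth + ((ch :: rs).take (i + 1)).count oc - 1 := by rw [htake]; omega
          have hidx2 : idx + 1 + i + 1 = idx + (i + 1) + 1 := by omega
          rw [harith, hidx2]
          simp [List.drop_succ_cons]
      · have hchoc : ch ≠ oc := by intro h; exact hop (by rw [ho, hone]; exact h)
        simp only [pvALoop, if_pos hd, if_neg hop, if_neg hclose, if_neg hd]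
        rw [ih (idx + 1) depth hd]
        simp only [List.idxOf?_cons, hbeq, Bool.false_eq_true, if_false]
        cases hidx : List.idxOf? cc rs with
        | none => simp
        | some i =>
          simp only [Option.map_some]
          have htake : ((ch :: rs).take (i + 1)).count oc = (rs.take i).count oc := by
            simp [List.take_succ_cons, List.count_cons, hchoc]
          have hidx2 : idx + 1 + i + 1 = idx + (i + 1) + 1 := by omega
          rw [← htake, hidx2]
          simp [List.drop_succ_cons]

-- B's jump loop agrees with A's automaton once the depth is positive
theorem pvBLoop_eq (text open_ close : String) (oc cc : Char)
    (ho : open_ = String.ofList [oc]) (hc : close = String.ofList [cc]) (hne : oc ≠ cc) :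
    ∀ (fuel pos depth : Nat), depth ≠ 0 → (text.toList.drop pos).length ≤ fuel →
      pvBLoop text open_ close fuel pos (depth : Int)
        = pvALoop text open_ close pos (text.toList.drop pos) depth := by
  intro fuel
  induction fuel with
  | zero =>
    intro pos depth hd hlen
    have h0 : text.toList.drop pos = [] := List.eq_nil_of_length_eq_zero (by omega)
    rw [h0]
    rfl
  | succ f ih =>
    intro pos depth hd hlen
    have hct : close.toList = [cc] := by rw [hc]; simp
    have hot : open_.toList = [oc] := by rw [ho]; simp
    rw [pvAJump text open_ close oc cc ho hc hne _ pos depth hd]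
    simp only [pvBLoop, hct, hot, pvFind_single]
    cases hidx : List.idxOf? cc (text.toList.drop pos) with
    | none => simp
    | some i =>
      have hne1 : ¬ ((i : Int) = -1) := by omega
      simp only [if_neg hne1, Int.toNat_natCast, pvCount_single]
      have hcast : (depth : Int) + (((text.toList.drop pos).take i).count oc : Int) - 1
          = ((depth + ((text.toList.drop pos).take i).count oc - 1 : Nat) : Int) := by omega
      simp only [hcast, Nat.cast_eq_zero]
      by_cases hz : depth + ((text.toList.drop pos).take i).count oc - 1 = 0
      · rw [if_pos hz, if_pos hz]
      · rw [if_neg hz, if_neg hz]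
        have hl2 : (text.toList.drop (pos + i + 1)).length ≤ f := by
          simp only [List.length_drop] at hlen ⊢
          omega
        rw [ih (pos + i + 1) _ hz hl2, List.drop_drop]
        congr 1

-- the first jump: B enters at the opener with balance 0; A has already consumed it (depth 1)
theorem pvBEntry (text open_ close : String) (oc cc : Char)
    (ho : open_ = String.ofList [oc]) (hc : close = String.ofList [cc]) (hne : oc ≠ cc) :
    ∀ (fuel pos : Nat) (rs : List Char), text.toList.drop pos = oc :: rs →
      (text.toList.drop pos).length ≤ fuel + 1 →
      pvBLoop text open_ close (fuel + 1) pos 0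
        = pvALoop text open_ close (pos + 1) rs 1 := by
  intro fuel pos rs hdrop hlen
  have hct : close.toList = [cc] := by rw [hc]; simp
  have hot : open_.toList = [oc] := by rw [ho]; simp
  rw [pvAJump text open_ close oc cc ho hc hne rs (pos + 1) 1 (by omega)]
  simp only [pvBLoop, hct, hot, pvFind_single, hdrop, List.idxOf?_cons, beq_iff_eq, hne,
    if_false, pvCount_single]
  cases hidx : List.idxOf? cc rs with
  | none => simp
  | some i =>
    have hilt : i < rs.length := (List.idxOf?_eq_some_iff.mp hidx).1
    simp only [Option.map_some, if_neg (show ¬ (((i + 1 : Nat) : Int) = -1) by omega),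
      Int.toNat_natCast]
    have htake : ((oc :: rs).take (i + 1)).count oc = (rs.take i).count oc + 1 := by
      simp [List.take_succ_cons, List.count_cons]
    have hcast : (0 : Int) + (((oc :: rs).take (i + 1)).count oc : Int) - 1
        = (((rs.take i).count oc : Nat) : Int) := by rw [htake]; push_cast; ring
    simp only [hcast, Nat.cast_eq_zero]
    have harith : 1 + (rs.take i).count oc - 1 = (rs.take i).count oc := by omega
    rw [harith]
    by_cases hz : (rs.take i).count oc = 0
    · rw [if_pos hz, if_pos hz]
      have h3 : pos + (i + 1) + 1 = pos + 1 + i + 1 := by omega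
      rw [h3]
    · rw [if_neg hz, if_neg hz]
      have hlen2 : rs.length + 1 ≤ fuel + 1 := by
        rw [hdrop] at hlen; simpa using hlen
      have hl2 : (text.toList.drop (pos + (i + 1) + 1)).length ≤ fuel := by
        rw [show pos + (i + 1) + 1 = pos + (i + 2) from by omega, ← List.drop_drop, hdrop]
        simp only [List.drop_succ_cons, List.length_drop]
        omega
      rw [pvBLoop_eq text open_ close oc cc ho hc hne fuel (pos + (i + 1) + 1) _ hz hl2]
      have hdd : text.toList.drop (pos + (i + 1) + 1) = rs.drop (i + 1) := by
        have h4 : pos + (i + 1) + 1 = pos + (i + 2) := by omega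
        rw [h4, ← List.drop_drop, hdrop]
        simp
      rw [hdd]
      congr 1
      omega

-- ===== VERDICT (by name: the statement is the Claim_ definition above) =====
theorem split_on_delimited_prefix_py_spec : Claim_equal_split_on_delimited_prefix_py := by
  intro text open_ close _
  unfold Spec_split_on_delimited_prefix_py split_on_delimited_prefix_py split_on_delimited_prefix_py_alt
  rw [pvASkip text open_ close text.toList 0]
  simp only [PySem.Chars.lstrip]
  cases hstr : List.dropWhile PySem.Chars.isspace text.toList with
  | nil => rfl
  | cons ch rs =>
    by_cases hop : String.ofList [ch] = open_
    · simp only [hop, ne_eq, not_true_eq_false, if_false, if_true, ite_not, Nat.zero_add]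
      by_cases hg : PySem.Str.len close ≠ 1 ∨ close = open_
      · -- degenerate delimiters: close is not one character, or close = open; both sides are none
        rw [if_pos hg]
        refine pvANeverCloses text open_ close ?_ rs _ 1 (by omega)
        intro ch' hch'
        rcases hg with hg | hg
        · exfalso
          apply hg
          have : close.toList = [ch'] := by rw [← hch']; simp
          simp [this]
        · rw [hch', hg]
      · rw [if_neg hg]
        push_neg at hg
        obtain ⟨hlen1, hneq⟩ := hg
        have hlen1' : close.toList.length = 1 := by
          have := PySem.Str.len_eq close
          omega
        obtain ⟨cc, hcc⟩ := List.length_eq_one_iff.mp hlen1'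
        have hclose : close = String.ofList [cc] := by
          have := (pvOfList_eq_iff [cc] close).mpr hcc.symm
          exact this.symm
        have hne : ch ≠ cc := by
          intro h
          apply hneq
          rw [hclose, ← h, hop]
        have hdrop : text.toList.drop (text.toList.length - (ch :: rs).length) = ch :: rs := by
          rw [← hstr, pvDrop_lstrip, hstr]
        have hfl : (text.toList.drop (text.toList.length - (ch :: rs).length)).length
            ≤ text.toList.length + 1 := by
          simp only [List.length_drop]
          omega
        rw [pvBEntry text open_ close ch cc hop.symm hclose hne text.toList.length
          (text.toList.length - (ch :: rs).length) rs hdrop hfl]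
    · simp [hop]
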